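-- pv_equiv track=rewrite | github.com/RyuYS-17/programmers | Lv2/find_prime.py | permutateNumber
-- ===== SOURCE A (Python) =====
-- def permutateNumber(list_numbers):
--     from itertools import permutations
--     permutation_numbers = []
--     for length in range(1, len(list_numbers)+1):
--         temp = permutations(list_numbers, length)
--         for number in temp:
--             permutation_numbers.append(number)
--     return permutation_numbers
-- ===== SOURCE B (Python) =====
-- def permutateNumber(list_numbers):
--     result = []
--     layer = [((), list_numbers)]
--     for _ in range(len(list_numbers)):
--         next_layer = []
--         for perm, rest in layer:
--             for i in range(len(rest)):
--                 next_layer.append((perm + (rest[i],), rest[:i] + rest[i+1:]))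
--         layer = next_layer
--         for perm, _ in layer:
--             result.append(perm)
--     return result
-- ===== Notes on version B (the rewrite author's own statement) =====
-- stated objective: alternative
-- what changed: Replaced the per-length itertools.permutations calls with a single breadth-first layer expansion: a list of (partial permutation, remaining elements) pairs is extended one position at a time, and each layer's permutations are collected in order.
import Mathlib
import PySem

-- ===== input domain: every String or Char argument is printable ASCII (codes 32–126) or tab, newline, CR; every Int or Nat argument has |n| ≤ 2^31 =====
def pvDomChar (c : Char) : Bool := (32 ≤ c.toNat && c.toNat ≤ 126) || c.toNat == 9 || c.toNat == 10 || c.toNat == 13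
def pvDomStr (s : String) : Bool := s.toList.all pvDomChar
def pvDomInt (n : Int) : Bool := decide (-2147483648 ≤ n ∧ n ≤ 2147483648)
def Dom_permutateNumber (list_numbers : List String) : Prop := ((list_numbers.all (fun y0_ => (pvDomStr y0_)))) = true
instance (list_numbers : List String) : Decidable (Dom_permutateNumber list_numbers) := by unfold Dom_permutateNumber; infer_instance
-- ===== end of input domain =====

-- B replaces the per-length itertools.permutations calls by one breadth-first layer
-- expansion of (partial permutation, remaining elements) pairs: an alternative
-- decomposition of the same cost.

-- ===== PORT A =====
-- each element of xs paired with the list of the remaining elements, in order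
def selsA (xs : List String) : List (String × List String) :=
  match xs with
  | [] => []
  | x :: rest => (x, rest) :: (selsA rest).map (fun s => (s.1, x :: s.2))

-- itertools.permutations(xs, r): all r-permutations, in lexicographic index order
def pickA : Nat → List String → List (List String)
  | 0, _ => [[]]
  | r + 1, xs => (selsA xs).flatMap (fun s => (pickA r s.2).map (fun p => s.1 :: p))

def permutateNumber (list_numbers : List String) : List (List String) :=
  (PySem.List.pyRange 1 ((list_numbers.length : Int) + 1) 1).foldl
    (fun acc len => acc ++ pickA len.toNat list_numbers) []

-- ===== PORT B =====
-- one BFS step: extend every (partial permutation, rest) by each index of rest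
def stepB (layer : List (List String × List String)) : List (List String × List String) :=
  layer.flatMap (fun pr =>
    (List.range pr.2.length).map (fun i =>
      (pr.1 ++ [pr.2.getD i ""], pr.2.take i ++ pr.2.drop (i + 1))))

def permutateNumber_alt (list_numbers : List String) : List (List String) :=
  ((List.range list_numbers.length).foldl
    (fun st _ =>
      let nextLayer := stepB st.2
      (st.1 ++ nextLayer.map Prod.fst, nextLayer))
    ([], [([], list_numbers)])).1

-- ===== PRECONDITION & SPEC =====
def Spec_permutateNumber (list_numbers : List String) (out : List (List String)) : Prop := out = permutateNumber_alt list_numbers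
instance (list_numbers : List String) (out : List (List String)) : Decidable (Spec_permutateNumber list_numbers out) := by unfold Spec_permutateNumber; infer_instance

-- ===== CLAIM (what is proved, stated in full; the proofs are below) =====
def Claim_equal_permutateNumber : Prop := ∀ (list_numbers : List String), Dom_permutateNumber list_numbers → Spec_permutateNumber list_numbers (permutateNumber list_numbers)

-- ===== LEMMAS AND PROOFS =====

-- partial permutations of length r of xs together with the unused elements
def pickPairs : Nat → List String → List (List String × List String)
  | 0, xs => [([], xs)]
  | r + 1, xs => (selsA xs).flatMap (fun s => (pickPairs r s.2).map (fun q => (s.1 :: q.1, q.2)))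

theorem pickA_eq_map_fst (r : Nat) (xs : List String) :
    pickA r xs = (pickPairs r xs).map Prod.fst := by
  induction r generalizing xs with
  | zero => simp [pickA, pickPairs]
  | succ r ih =>
    simp [pickA, pickPairs, List.map_flatMap, Function.comp_def, ih]

theorem selsA_eq_range (xs : List String) :
    (List.range xs.length).map (fun i => (xs.getD i "", xs.take i ++ xs.drop (i + 1)))
      = selsA xs := by
  induction xs with
  | nil => simp [selsA]
  | cons x rest ih =>
    rw [List.length_cons, List.range_succ_eq_map, List.map_cons, List.map_map, selsA, ← ih,
      List.map_map]
    rfl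

theorem flatMap_single {α β : Type} (l : List α) (f : α → β) :
    l.flatMap (fun a => [f a]) = l.map f := by
  induction l with
  | nil => rfl
  | cons a l ih => simp [ih]

theorem stepB_map_cons (a : String) (L : List (List String × List String)) :
    stepB (L.map (fun q => (a :: q.1, q.2))) = (stepB L).map (fun q => (a :: q.1, q.2)) := by
  simp [stepB, List.map_flatMap, List.flatMap_map, Function.comp_def]

theorem stepB_pickPairs (r : Nat) (xs : List String) :
    stepB (pickPairs r xs) = pickPairs (r + 1) xs := by
  induction r generalizing xs with
  | zero =>
    simp only [pickPairs, stepB, List.flatMap_cons, List.flatMap_nil, List.append_nil]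
    rw [← selsA_eq_range xs, List.flatMap_map]
    simp only [List.map_cons, List.map_nil]
    rw [flatMap_single]
    rfl
  | succ r ih =>
    simp only [pickPairs, stepB, List.flatMap_assoc]
    have : ∀ s : String × List String,
        stepB ((pickPairs r s.2).map (fun q => (s.1 :: q.1, q.2)))
          = (pickPairs (r + 1) s.2).map (fun q => (s.1 :: q.1, q.2)) := by
      intro s; rw [stepB_map_cons, ih]
    simp only [stepB] at this
    calc (selsA xs).flatMap (fun s => ((pickPairs r s.2).map (fun q => (s.1 :: q.1, q.2))).flatMap
            (fun pr => (List.range pr.2.length).map (fun i =>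
              (pr.1 ++ [pr.2.getD i ""], pr.2.take i ++ pr.2.drop (i + 1)))))
        = (selsA xs).flatMap (fun s => (pickPairs (r + 1) s.2).map (fun q => (s.1 :: q.1, q.2))) := by
          apply List.flatMap_congr; intro s _; exact this s
      _ = pickPairs (r + 1 + 1) xs := rfl

theorem loopB (xs : List String) (n : Nat) :
    (List.range n).foldl
      (fun st (_ : Nat) =>
        let nextLayer := stepB st.2
        (st.1 ++ nextLayer.map Prod.fst, nextLayer))
      ([], [([], xs)])
    = ((List.range n).foldl (fun acc i => acc ++ pickA (i + 1) xs) [], pickPairs n xs) := by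
  induction n with
  | zero => simp [pickPairs]
  | succ n ih =>
    rw [List.range_succ, List.foldl_append, List.foldl_append, ih]
    simp only [List.foldl_cons, List.foldl_nil]
    rw [stepB_pickPairs, ← pickA_eq_map_fst]

theorem permutateNumber_eq (xs : List String) :
    permutateNumber xs = permutateNumber_alt xs := by
  unfold permutateNumber permutateNumber_alt
  rw [loopB]
  rw [PySem.List.pyRange_one]
  have h1 : ((xs.length : Int) + 1 - 1).toNat = xs.length := by omega
  rw [h1, List.foldl_map]
  apply PySem.List.foldl_congr_mem
  intro acc i hi
  have h2 : (1 + (i : Int)).toNat = i + 1 := by omega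
  rw [h2]

-- ===== VERDICT (by name: the statement is the Claim_ definition above) =====
theorem permutateNumber_spec : Claim_equal_permutateNumber := by
  intro xs _
  unfold Spec_permutateNumber
  exact permutateNumber_eq xs
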